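-- pv_equiv track=rewrite | github.com/EWRK0303/Formal-Languages | data/gen_dyck2.py | output_generator
-- ===== SOURCE A (Python) =====
-- from typing import List, Tuple, Dict, Any
--
-- def output_generator(string: str) -> List[List[int]]:
--     """
--     Convert Dyck-2 string to enhanced stack state output
--
--     Args:
--         string: Dyck-2 string
--
--     Returns:
--         enhanced stack state at each position (3-state encoding)
--         [empty, round_only, square_or_mixed]
--     """
--     stack = []
--     outputs = []
--
--     for char in string:
--         if char in ['(', '[']:  # opening brackets
--             stack.append(char)
--         elif char in [')', ']']:  # closing brackets
--             if stack:
--                 # Check matching before popping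
--                 if char == ')' and stack[-1] == '(':
--                     stack.pop()
--                 elif char == ']' and stack[-1] == '[':
--                     stack.pop()
--                 # If not matching, don't pop (invalid string)
--
--         # Create enhanced stack state encoding
--         if len(stack) == 0:
--             outputs.append([1, 0, 0])  # empty stack
--         else:
--             # Check if stack contains only round brackets
--             has_round = any(bracket == '(' for bracket in stack)
--             has_square = any(bracket == '[' for bracket in stack)
--
--             if has_round and not has_square:
--                 outputs.append([0, 1, 0])  # round brackets only
--             else:
--                 outputs.append([0, 0, 1])  # square brackets or mixed
--
--     return outputs
-- ===== SOURCE B (Python) =====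
-- def output_generator(string):
--     # keep the stack plus an incremental count of square brackets on it,
--     # so the per-position class is decided from the counter without rescanning the stack.
--     stack = []
--     squares = 0
--     outputs = []
--     for char in string:
--         if char == '(' or char == '[':
--             stack.append(char)
--             if char == '[':
--                 squares += 1
--         elif (char == ')' or char == ']') and stack:
--             top = stack[-1]
--             if (char == ')' and top == '(') or (char == ']' and top == '['):
--                 stack.pop()
--                 if top == '[':
--                     squares -= 1
--         if not stack:
--             outputs.append([1, 0, 0])
--         elif squares == 0:
--             outputs.append([0, 1, 0])
--         else:
--             outputs.append([0, 0, 1])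
--     return outputs
-- ===== Notes on version B (the rewrite author's own statement) =====
-- stated objective: alternative
-- what changed: B maintains an incremental count of square brackets on the stack and decides each position's 3-class encoding from that counter, instead of rescanning the stack with two any() passes at every character.
import Mathlib
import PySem

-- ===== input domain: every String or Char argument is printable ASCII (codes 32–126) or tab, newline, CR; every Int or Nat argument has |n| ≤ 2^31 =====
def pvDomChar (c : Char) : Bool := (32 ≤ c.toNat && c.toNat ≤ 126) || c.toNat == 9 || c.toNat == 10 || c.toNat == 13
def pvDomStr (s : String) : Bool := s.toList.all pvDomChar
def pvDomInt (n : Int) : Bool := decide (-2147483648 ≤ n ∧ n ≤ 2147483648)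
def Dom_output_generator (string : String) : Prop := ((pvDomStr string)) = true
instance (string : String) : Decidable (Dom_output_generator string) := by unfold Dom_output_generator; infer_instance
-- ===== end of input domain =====

-- B replaces A's per-character stack rescans (two any() passes) by an incrementally maintained count of square brackets on the stack.

-- ===== PORT A =====
-- stack is represented head-as-top (Python list end = Lean list head)
def pvStepA (stack : List Char) (c : Char) : List Char :=
  if c = '(' ∨ c = '[' then c :: stack
  else if c = ')' ∨ c = ']' then
    match stack with
    | [] => []
    | t :: rest =>
      if c = ')' ∧ t = '(' then rest
      else if c = ']' ∧ t = '[' then rest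
      else t :: rest
  else stack

def pvEncodeA (stack : List Char) : List Int :=
  if stack.length = 0 then [1, 0, 0]
  else
    let has_round := stack.any (fun b => b = '(')
    let has_square := stack.any (fun b => b = '[')
    if has_round ∧ ¬ has_square then [0, 1, 0] else [0, 0, 1]

def output_generator (string : String) : List (List Int) :=
  (string.toList.foldl
    (fun (st : List Char × List (List Int)) c =>
      let stack := pvStepA st.1 c
      (stack, st.2 ++ [pvEncodeA stack]))
    ([], [])).2

-- ===== PORT B =====
-- state: (stack, squares); squares is the maintained count of '[' on the stack
def pvStepB (st : List Char × Int) (c : Char) : List Char × Int :=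
  if c = '(' ∨ c = '[' then
    (c :: st.1, st.2 + (if c = '[' then 1 else 0))
  else if (c = ')' ∨ c = ']') ∧ st.1 ≠ [] then
    match st.1 with
    | [] => st
    | top :: rest =>
      if (c = ')' ∧ top = '(') ∨ (c = ']' ∧ top = '[') then
        (rest, st.2 - (if top = '[' then 1 else 0))
      else st
  else st

def pvEncodeB (st : List Char × Int) : List Int :=
  if st.1 = [] then [1, 0, 0]
  else if st.2 = 0 then [0, 1, 0]
  else [0, 0, 1]

def output_generator_alt (string : String) : List (List Int) :=
  (string.toList.foldl
    (fun (acc : (List Char × Int) × List (List Int)) c =>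
      let st := pvStepB acc.1 c
      (st, acc.2 ++ [pvEncodeB st]))
    (([], 0), [])).2

-- ===== PRECONDITION & SPEC =====
def Spec_output_generator (string : String) (out : List (List Int)) : Prop := out = output_generator_alt string
instance (string : String) (out : List (List Int)) : Decidable (Spec_output_generator string out) := by unfold Spec_output_generator; infer_instance

-- ===== CLAIM (what is proved, stated in full; the proofs are below) =====
def Claim_equal_output_generator : Prop := ∀ (string : String), Dom_output_generator string → Spec_output_generator string (output_generator string)

-- ===== LEMMAS AND PROOFS =====

-- invariant: every stack element is a bracket and the counter equals count of '['
def pvInv (stack : List Char) (sq : Int) : Prop :=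
  (∀ x ∈ stack, x = '(' ∨ x = '[') ∧ sq = (stack.count '[' : Int)

theorem pvStepB_stack (stack : List Char) (sq : Int) (c : Char) :
    (pvStepB (stack, sq) c).1 = pvStepA stack c := by
  unfold pvStepA pvStepB
  by_cases h1 : c = '(' ∨ c = '['
  · simp [h1]
  · simp only [h1, if_false]
    by_cases h2 : c = ')' ∨ c = ']'
    · cases stack with
      | nil => simp [h2]
      | cons t rest =>
        simp only [h2, ne_eq, reduceCtorEq, not_false_iff, and_true, if_true]
        by_cases hA : c = ')' ∧ t = '('
        · simp [hA]
        · by_cases hB : c = ']' ∧ t = '['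
          · simp [hA, hB]
          · simp [eq_false hA, eq_false hB]
    · simp [h2]

theorem pvCount_cons (t : Char) (rest : List Char) :
    (t :: rest).count '[' = rest.count '[' + (if t = '[' then 1 else 0) := by
  by_cases ht : t = '[' <;> simp [ht]

theorem pvStepB_inv (stack : List Char) (sq : Int) (c : Char) (h : pvInv stack sq) :
    pvInv (pvStepB (stack, sq) c).1 (pvStepB (stack, sq) c).2 := by
  obtain ⟨hmem, hcnt⟩ := h
  unfold pvStepB
  by_cases h1 : c = '(' ∨ c = '['
  · simp only [h1, if_true]
    refine ⟨?_, ?_⟩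
    · intro x hx
      rcases List.mem_cons.mp hx with hx | hx
      · exact hx ▸ h1
      · exact hmem x hx
    · rw [pvCount_cons]
      by_cases hc : c = '[' <;> simp [hc, hcnt]
  · simp only [h1, if_false]
    by_cases h2 : (c = ')' ∨ c = ']') ∧ stack ≠ []
    · cases stack with
      | nil => exact absurd rfl h2.2
      | cons t rest =>
        simp only [h2]
        by_cases h3 : (c = ')' ∧ t = '(') ∨ (c = ']' ∧ t = '[')
        · simp only [h3, if_true]
          refine ⟨fun x hx => hmem x (List.mem_cons_of_mem _ hx), ?_⟩
          rw [pvCount_cons] at hcnt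
          by_cases ht : t = '[' <;> simp [ht] at hcnt ⊢ <;> omega
        · simp only [h3, if_false]
          exact ⟨hmem, hcnt⟩
    · simp only [h2, if_false]
      exact ⟨hmem, hcnt⟩

theorem pvEncode_eq (stack : List Char) (sq : Int) (h : pvInv stack sq) :
    pvEncodeA stack = pvEncodeB (stack, sq) := by
  obtain ⟨hmem, hcnt⟩ := h
  unfold pvEncodeA pvEncodeB
  cases stack with
  | nil => simp
  | cons t rest =>
    by_cases hs : '[' ∈ t :: rest
    · have hpos : 0 < (t :: rest).count '[' := List.count_pos_iff.mpr hs
      have hne : sq ≠ 0 := by omega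
      have hanys : (t :: rest).any (fun b => b = '[') = true :=
        List.any_eq_true.mpr ⟨'[', hs, by simp⟩
      simp [hanys, hne]
    · have hcount0 : (t :: rest).count '[' = 0 := List.count_eq_zero.mpr hs
      have hsq0 : sq = 0 := by omega
      have hanys : (t :: rest).any (fun b => b = '[') = false := by
        rw [List.any_eq_false]
        intro x hx
        simp only [decide_eq_true_eq]
        intro hx'
        exact hs (hx' ▸ hx)
      have hr : (t :: rest).any (fun b => b = '(') = true := by
        refine List.any_eq_true.mpr ⟨t, by simp, ?_⟩
        rcases hmem t (by simp) with h | h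
        · simp [h]
        · exact absurd (h ▸ (by simp : t ∈ t :: rest)) hs
      simp [hanys, hr, hsq0]

theorem pv_fold_eq (l : List Char) (stack : List Char) (sq : Int) (outs : List (List Int))
    (h : pvInv stack sq) :
    (l.foldl (fun (st : List Char × List (List Int)) c =>
        let s := pvStepA st.1 c; (s, st.2 ++ [pvEncodeA s])) (stack, outs)).2 =
    (l.foldl (fun (acc : (List Char × Int) × List (List Int)) c =>
        let st := pvStepB acc.1 c; (st, acc.2 ++ [pvEncodeB st])) ((stack, sq), outs)).2 := by
  induction l generalizing stack sq outs with
  | nil => rfl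
  | cons c cs ih =>
    have hst := pvStepB_stack stack sq c
    have hpair : pvStepB (stack, sq) c = (pvStepA stack c, (pvStepB (stack, sq) c).2) := by
      rw [← hst]
    have hinv' : pvInv (pvStepA stack c) (pvStepB (stack, sq) c).2 := by
      have := pvStepB_inv stack sq c h
      rwa [hst] at this
    have henc : pvEncodeB (pvStepB (stack, sq) c) = pvEncodeA (pvStepA stack c) := by
      rw [hpair]
      exact (pvEncode_eq _ _ hinv').symm
    simp only [List.foldl_cons]
    rw [henc, hpair]
    exact ih _ _ _ hinv'

-- ===== VERDICT (by name: the statement is the Claim_ definition above) =====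
theorem output_generator_spec : Claim_equal_output_generator := by
  intro s _
  unfold Spec_output_generator output_generator output_generator_alt
  exact pv_fold_eq s.toList [] 0 [] ⟨by simp, by simp⟩
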